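/- GENERATED by c/gen_decode.py: decode facts of the image, one per distinct instruction byte string. -/
import UserX.DecodeImage

#decode_all ProgX.Base.Dec
  "4155"  -- push r13
  "48817fe84c495645"  -- cmp QWORD PTR [rdi-0x18],0x4556494c
  "48893c2550f01f00"  -- mov QWORD PTR ds:0x1ff050,rdi
  "488b0c2518f01f00"  -- mov rcx,QWORD PTR ds:0x1ff018
  "48c743e852454544"  -- mov QWORD PTR [rbx-0x18],0x44454552
  "4b8d742d00"  -- lea rsi,[r13+r13*1+0x0]
  "660f28c1"  -- movapd xmm0,xmm1
  "66480f6ec2"  -- movq xmm0,rdx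
  "742e"  -- je 102d0a
  "7733"  -- ja 1004bc
  "84c0"  -- test al,al
  "be08000000"  -- mov esi,0x8
  "e873f6ffff"  -- call 100059
  "e8dffcffff"  -- call 103200
  "eb4d"  -- jmp 1022a4
  "f20f101d93d60300"  -- movsd xmm3,QWORD PTR [rip+0x3d693]
  "f20f590531d70300"  -- mulsd xmm0,QWORD PTR [rip+0x3d731]
  "f20f5cd3"  -- subsd xmm2,xmm3
  "f2480f2cc0"  -- cvttsd2si rax,xmm0
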